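-- pv_equiv track=rewrite | github.com/BeneKlei/parabolische_inverse_probleme | utils.py | interpolate_between_grids
-- ===== SOURCE A (Python) =====
-- def interpolate_between_grids(N_fine, refinement_factor):
--     right = [i*(N_fine+1) for i in range(1,N_fine+2)]
--     left = [i-N_fine for i in right]
--     left = left[::refinement_factor]
--     right = right[::refinement_factor]
--     indices_coarse = []
--     for i in range(len(left)):
--         inds_x_axis = list(range(left[i], right[i]+1))
--         indices_coarse.extend(inds_x_axis[::refinement_factor])
--     N = N_fine/refinement_factor
--     assert len(indices_coarse) == (N+1)**2, 'wrong dimensions...'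
--     return [i-1 for i in indices_coarse]
-- ===== SOURCE B (Python) =====
-- def interpolate_between_grids(N_fine, refinement_factor):
--     # coarse node (row, col) sits at flat index row*(N_fine+1) + col on the fine grid
--     indices = [row * (N_fine + 1) + col
--                for row in range(0, N_fine + 1, refinement_factor)
--                for col in range(0, N_fine + 1, refinement_factor)]
--     N = N_fine / refinement_factor
--     assert len(indices) == (N + 1)**2, 'wrong dimensions...'
--     return indices
-- ===== Notes on version B (the rewrite author's own statement) =====
-- stated objective: simpler
-- what changed: B computes each coarse index directly as row*(N_fine+1)+col in one double comprehension over stepped ranges, instead of building right/left auxiliary arrays, slicing them, and slicing a per-row range inside a loop.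
-- outside the precondition, e.g. on interpolate_between_grids(0, -1): A returns [0], B raises AssertionError
import Mathlib
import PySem

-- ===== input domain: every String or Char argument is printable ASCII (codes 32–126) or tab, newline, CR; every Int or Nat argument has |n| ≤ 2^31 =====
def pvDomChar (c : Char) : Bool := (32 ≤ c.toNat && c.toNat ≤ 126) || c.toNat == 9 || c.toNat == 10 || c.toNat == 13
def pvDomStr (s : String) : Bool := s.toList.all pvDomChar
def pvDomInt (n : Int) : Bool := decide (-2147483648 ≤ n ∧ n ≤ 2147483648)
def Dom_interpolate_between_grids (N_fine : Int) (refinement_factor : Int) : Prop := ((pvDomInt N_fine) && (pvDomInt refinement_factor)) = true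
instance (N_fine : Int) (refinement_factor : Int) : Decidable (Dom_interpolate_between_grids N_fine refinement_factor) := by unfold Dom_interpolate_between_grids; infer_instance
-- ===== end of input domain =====

-- B replaces A's right/left auxiliary arrays and per-row range-building-and-slicing by one
-- double comprehension computing row*(N_fine+1)+col directly (simpler decomposition).


-- ===== PORT A =====
-- literal transliteration of A; its assert only raises (AssertionError), and Pre_ excludes
-- exactly the inputs where it fires, so it contributes no value here.
def interpolate_between_grids (N_fine : Int) (refinement_factor : Int) : List Int :=
  let right := (PySem.List.pyRange 1 (N_fine + 2) 1).map (fun i => i * (N_fine + 1))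
  let left := right.map (fun i => i - N_fine)
  let left := (PySem.List.slice? left none none refinement_factor).getD []
  let right := (PySem.List.slice? right none none refinement_factor).getD []
  let indices_coarse :=
    (PySem.List.pyRange 0 (PySem.List.len left) 1).foldl
      (fun acc i =>
        let inds_x_axis :=
          PySem.List.pyRange (PySem.List.pyGetD left i 0) (PySem.List.pyGetD right i 0 + 1) 1
        acc ++ (PySem.List.slice? inds_x_axis none none refinement_factor).getD []) []
  indices_coarse.map (fun i => i - 1)

-- ===== PORT B =====
-- B's assert never fires inside Pre_, so it contributes no value here either.
def interpolate_between_grids_alt (N_fine : Int) (refinement_factor : Int) : List Int :=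
  (PySem.List.pyRange 0 (N_fine + 1) refinement_factor).flatMap (fun row =>
    (PySem.List.pyRange 0 (N_fine + 1) refinement_factor).map (fun col =>
      row * (N_fine + 1) + col))

-- ===== PRECONDITION & SPEC =====
-- Pre_ is where A returns normally (refinement_factor ≥ 1 and either it divides N_fine ≥ 0 or
-- N_fine = -refinement_factor, where both return []); everywhere else A raises
-- (step 0 → ValueError, otherwise the assert → AssertionError) EXCEPT N_fine = 0 with a
-- negative refinement_factor: there A's reversed slices accidentally still yield [0] while B's
-- empty stepped range makes B's own assert raise, so that corner is excluded too (see cites).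
def Pre_interpolate_between_grids (N_fine : Int) (refinement_factor : Int) : Prop :=
  1 ≤ refinement_factor ∧
    (N_fine = -refinement_factor ∨ (0 ≤ N_fine ∧ refinement_factor ∣ N_fine))
instance (N_fine : Int) (refinement_factor : Int) : Decidable (Pre_interpolate_between_grids N_fine refinement_factor) := by unfold Pre_interpolate_between_grids; infer_instance

def pvWitness_interpolate_between_grids : Int × Int := (4, 2)

def Spec_interpolate_between_grids (N_fine : Int) (refinement_factor : Int) (out : List Int) : Prop := out = interpolate_between_grids_alt N_fine refinement_factor
instance (N_fine : Int) (refinement_factor : Int) (out : List Int) : Decidable (Spec_interpolate_between_grids N_fine refinement_factor out) := by unfold Spec_interpolate_between_grids; infer_instance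

-- ===== CLAIM (what is proved, stated in full; the proofs are below) =====
def Claim_equal_interpolate_between_grids : Prop := ∀ (N_fine : Int) (refinement_factor : Int), Dom_interpolate_between_grids N_fine refinement_factor → Pre_interpolate_between_grids N_fine refinement_factor → Spec_interpolate_between_grids N_fine refinement_factor (interpolate_between_grids N_fine refinement_factor)

-- ===== LEMMAS AND PROOFS =====

-- xs[::r] of the empty list, positive step
lemma slice_nil_pos_step {α : Type} (r : Int) (hr : 0 < r) :
    PySem.List.slice? ([] : List α) none none r = some [] := by
  simp [PySem.List.slice?, PySem.List.sliceIndices]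
  omega

-- xs[::r] for positive r on a list given as (range L).map f: every r-th element, by index
lemma slice_step_map_range {α : Type} (f : Nat → α) (L : Nat) (r : Int) (hr : 0 < r) :
    PySem.List.slice? ((List.range L).map f) none none r
      = some ((List.range (((L:Int)+r-1)/r).toNat).map
          (fun (k : Nat) => f ((r * (k:Int)).toNat))) := by
  have hne : r ≠ 0 := by omega
  have hnlt : ¬ r < 0 := by omega
  simp only [PySem.List.slice?, PySem.List.sliceIndices, hne, List.length_map,
    List.length_range, if_pos hr, hnlt, if_false]
  have hc : (if 0 < (L:Int) then (((L:Int) - 0 + r - 1) / r).toNat else 0)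
      = (((L:Int)+r-1)/r).toNat := by
    split_ifs with h
    · norm_num
    · have hL : L = 0 := by omega
      subst hL
      have h0 : ((0:Nat):Int) + r - 1 = r - 1 := by omega
      rw [h0, Int.ediv_eq_zero_of_lt (by omega) (by omega)]
      rfl
  rw [hc]
  congr 1
  have hmul : ((L:Int)+r-1)/r * r ≤ (L:Int)+r-1 := Int.ediv_mul_le _ hne
  have hbound : ∀ x : Nat, x < (((L:Int)+r-1)/r).toNat → (r * (x:Int)).toNat < L := by
    intro x hx
    have h1 : (x:Int) + 1 ≤ ((L:Int)+r-1)/r := by omega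
    have h2 : ((x:Int) + 1) * r ≤ ((L:Int)+r-1)/r * r :=
      mul_le_mul_of_nonneg_right h1 (by omega)
    have h3 : 0 ≤ r * (x:Int) := by positivity
    have h4 : r * (x:Int) ≤ (L:Int) - 1 := by nlinarith
    omega
  calc List.filterMap (fun (x : Nat) => (List.map f (List.range L))[(0 + r * (x:Int)).toNat]?)
        (List.range (((L:Int)+r-1)/r).toNat)
      = List.filterMap (fun (x : Nat) => some (f ((r * (x:Int)).toNat)))
        (List.range (((L:Int)+r-1)/r).toNat) := by
        apply List.filterMap_congr
        intro x hx
        have := hbound x (List.mem_range.mp hx)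
        simp [this]
    _ = _ := congrFun List.filterMap_eq_map _

-- the ordinary grid case: both sides enumerate (row, col) over the same stepped range
lemma ports_agree_of_nonneg (N r : Int) (hr : 0 < r) (hn : 0 ≤ N) :
    interpolate_between_grids N r = interpolate_between_grids_alt N r := by
  simp only [interpolate_between_grids, interpolate_between_grids_alt]
  rw [PySem.List.pyRange_one 1 (N+2)]
  have e1 : N + 2 - 1 = N + 1 := by ring
  rw [e1]
  simp only [List.map_map]
  rw [slice_step_map_range _ _ _ hr]
  rw [slice_step_map_range _ _ _ hr]
  simp only [Option.getD_some]
  rw [PySem.List.len_eq]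
  simp only [List.length_map, List.length_range]
  rw [PySem.List.pyRange_zero_natCast, PySem.List.foldl_append_eq_flatMap, List.nil_append,
      List.flatMap_map, List.map_flatMap]
  rw [PySem.List.pyRange_of_pos 0 (N+1) hr]
  rw [if_pos (show (0:Int) < N + 1 by omega)]
  have hLc : (((N+1).toNat : Int)) = N + 1 := Int.toNat_of_nonneg (by omega)
  rw [hLc]
  have e2 : N + 1 - 0 + r - 1 = N + 1 + r - 1 := by ring
  rw [e2]
  rw [List.flatMap_map]
  apply List.flatMap_congr
  intro j hj
  have hjc := List.mem_range.mp hj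
  simp only [PySem.List.pyGetD_natCast, List.getD_eq_getElem?_getD, List.getElem?_map,
    List.getElem?_range, hjc, Option.map_some, Option.getD_some, Function.comp_apply]
  have tj : (((r * (j:Int)).toNat : Int)) = r * (j:Int) := Int.toNat_of_nonneg (by positivity)
  rw [tj, PySem.List.pyRange_one]
  have e3 : (1 + r * (j:Int)) * (N + 1) + 1 - ((1 + r * (j:Int)) * (N + 1) - N) = N + 1 := by
    ring
  rw [e3, slice_step_map_range _ _ _ hr, Option.getD_some]
  simp only [List.map_map, hLc]
  apply List.map_congr_left
  intro k hk
  have tk : (((r * (k:Int)).toNat : Int)) = r * (k:Int) := Int.toNat_of_nonneg (by positivity)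
  simp only [Function.comp_apply, tk]
  ring

-- the degenerate case N_fine = -refinement_factor: both sides are empty
lemma ports_agree_of_neg (r : Int) (hr : 0 < r) :
    interpolate_between_grids (-r) r = interpolate_between_grids_alt (-r) r := by
  simp only [interpolate_between_grids, interpolate_between_grids_alt]
  rw [PySem.List.pyRange_one_eq_nil (by omega)]
  simp only [List.map_nil]
  rw [slice_nil_pos_step _ hr]
  simp only [Option.getD_some, PySem.List.len_eq, List.length_nil]
  rw [PySem.List.pyRange_of_pos 0 (-r+1) hr]
  rw [if_neg (show ¬ ((0:Int) < -r + 1) by omega)]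
  simp [PySem.List.pyRange_one_eq_nil]

-- ===== VERDICT (by name: the statement is the Claim_ definition above) =====
theorem interpolate_between_grids_spec : Claim_equal_interpolate_between_grids := by
  intro N_fine refinement_factor _ hpre
  obtain ⟨hr, hcase⟩ := hpre
  unfold Spec_interpolate_between_grids
  rcases hcase with hneg | ⟨hn, -⟩
  · subst hneg
    exact ports_agree_of_neg refinement_factor (by omega)
  · exact ports_agree_of_nonneg N_fine refinement_factor (by omega) hn
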